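-- pv_equiv track=rewrite | github.com/microsoft/intelligence-toolkit | python/question_answering/search_answers.py | get_test_progress
-- ===== SOURCE A (Python) =====
-- def get_test_progress(test_history):
--     current_search = ''
--     current_relevant = 0
--     current_tested = 0
--     total_relevant = 0
--     total_tested = 0
--     rounds = []
--     for ix, (search, chunk, response) in enumerate(test_history):
--         if search != current_search:
--             if current_search != '':
--                 rounds.append(f'{current_search}: {current_relevant}/{current_tested}')
--             current_search = search
--             current_relevant = 0
--             current_tested = 0
--         current_tested += 1
--         total_tested += 1
--         if response == 'Yes':
--             current_relevant += 1
--             total_relevant += 1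
--     if current_search != '':
--         rounds.append(f'{current_search}: {current_relevant}/{current_tested}')
--     response = f'**Chunks relevant/tested: {total_relevant}/{total_tested}**'
--     if len(rounds) > 0:
--         response += ' (' + '; '.join(rounds) + ')'
--     return response
-- ===== SOURCE B (Python) =====
-- def get_test_progress(test_history):
--     n = len(test_history)
--     total_relevant = sum(1 for _, _, r in test_history if r == 'Yes')
--     rounds = []
--     i = 0
--     while i < n:
--         s = test_history[i][0]
--         j = i
--         while j < n and test_history[j][0] == s:
--             j += 1
--         if s != '':
--             rel = sum(1 for _, _, r in test_history[i:j] if r == 'Yes')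
--             rounds.append(f'{s}: {rel}/{j - i}')
--         i = j
--     out = f'**Chunks relevant/tested: {total_relevant}/{n}**'
--     if rounds:
--         out += ' (' + '; '.join(rounds) + ')'
--     return out
-- ===== Notes on version B (the rewrite author's own statement) =====
-- stated objective: alternative
-- what changed: Replaces A's single stateful pass (running current-round counters flushed on search change) by a run-based decomposition: totals come from a separate len/sum pass, and rounds are produced by advancing over maximal runs of equal search values, recounting each run from its slice.
import Mathlib
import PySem

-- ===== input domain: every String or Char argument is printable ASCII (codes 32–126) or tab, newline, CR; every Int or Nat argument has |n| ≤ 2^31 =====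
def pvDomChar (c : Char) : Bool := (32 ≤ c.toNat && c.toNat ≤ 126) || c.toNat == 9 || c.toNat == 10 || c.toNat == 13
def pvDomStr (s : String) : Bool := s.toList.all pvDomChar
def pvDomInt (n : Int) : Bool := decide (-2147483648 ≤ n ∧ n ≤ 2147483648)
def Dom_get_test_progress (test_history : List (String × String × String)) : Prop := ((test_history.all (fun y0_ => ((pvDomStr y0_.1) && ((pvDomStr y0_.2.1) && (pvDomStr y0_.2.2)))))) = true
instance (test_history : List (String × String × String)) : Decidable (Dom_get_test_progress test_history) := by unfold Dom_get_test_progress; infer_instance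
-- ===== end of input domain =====

-- B replaces A's single stateful flush-on-change pass by a run-based decomposition with a
-- separate totals pass; same output, same cost (objective: alternative).

-- ===== PORT A =====
def fmtRound (s : String) (rel tested : Nat) : String :=
  s ++ ": " ++ toString rel ++ "/" ++ toString tested

-- the loop body of A, state = (current_search, current_relevant, current_tested, total_relevant, total_tested, rounds)
def stepA (st : String × Nat × Nat × Nat × Nat × List String)
    (x : String × String × String) : String × Nat × Nat × Nat × Nat × List String :=
  match st, x with
  | (cs, cr, ct, tr, tt, rds), (search, _chunk, resp) =>
    let (cs, cr, ct, rds) :=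
      if search ≠ cs then
        (search, 0, 0, if cs ≠ "" then rds ++ [fmtRound cs cr ct] else rds)
      else (cs, cr, ct, rds)
    let ct := ct + 1
    let tt := tt + 1
    let (cr, tr) := if resp = "Yes" then (cr + 1, tr + 1) else (cr, tr)
    (cs, cr, ct, tr, tt, rds)

def get_test_progress (test_history : List (String × String × String)) : String :=
  match test_history.foldl stepA ("", 0, 0, 0, 0, []) with
  | (cs, cr, ct, tr, tt, rds) =>
    let rounds := if cs ≠ "" then rds ++ [fmtRound cs cr ct] else rds
    let response := "**Chunks relevant/tested: " ++ toString tr ++ "/" ++ toString tt ++ "**"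
    if rounds.length > 0 then response ++ " (" ++ String.intercalate "; " rounds ++ ")"
    else response

-- ===== PORT B =====
def countYes (l : List (String × String × String)) : Nat :=
  (l.filter (fun y => y.2.2 == "Yes")).length

-- B's outer while loop: advance over maximal runs of equal search values
def altRounds : List (String × String × String) → List String
  | [] => []
  | x :: t =>
    let run := x :: t.takeWhile (fun y => y.1 == x.1)
    let rest := t.dropWhile (fun y => y.1 == x.1)
    if x.1 = "" then altRounds rest
    else fmtRound x.1 (countYes run) run.length :: altRounds rest
termination_by l => l.length
decreasing_by
  all_goals
    have h := List.length_dropWhile_le (fun y => y.1 == x.1) t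
    simp only [List.length_cons]
    omega

def get_test_progress_alt (test_history : List (String × String × String)) : String :=
  let n := test_history.length
  let total_relevant := countYes test_history
  let rounds := altRounds test_history
  let out := "**Chunks relevant/tested: " ++ toString total_relevant ++ "/" ++ toString n ++ "**"
  if rounds ≠ [] then out ++ " (" ++ String.intercalate "; " rounds ++ ")"
  else out

-- ===== PRECONDITION & SPEC =====
def Spec_get_test_progress (test_history : List (String × String × String)) (out : String) : Prop := out = get_test_progress_alt test_history
instance (test_history : List (String × String × String)) (out : String) : Decidable (Spec_get_test_progress test_history out) := by unfold Spec_get_test_progress; infer_instance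

-- ===== CLAIM (what is proved, stated in full; the proofs are below) =====
def Claim_equal_get_test_progress : Prop := ∀ (test_history : List (String × String × String)), Dom_get_test_progress test_history → Spec_get_test_progress test_history (get_test_progress test_history)

-- ===== LEMMAS AND PROOFS =====

-- A's final flush of the pending round
def finishRounds : String × Nat × Nat × Nat × Nat × List String → List String
  | (cs, cr, ct, _, _, rds) => if cs ≠ "" then rds ++ [fmtRound cs cr ct] else rds

theorem countYes_cons (x : String × String × String) (l : List (String × String × String)) :
    countYes (x :: l) = (if x.2.2 = "Yes" then 1 else 0) + countYes l := by
  simp only [countYes, List.filter_cons]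
  by_cases h : x.2.2 = "Yes" <;> simp [h] <;> omega

theorem totals_lemma :
    ∀ (h : List (String × String × String)) (cs : String) (cr ct tr tt : Nat) (rds : List String),
    (h.foldl stepA (cs, cr, ct, tr, tt, rds)).2.2.2.1 = tr + countYes h ∧
    (h.foldl stepA (cs, cr, ct, tr, tt, rds)).2.2.2.2.1 = tt + h.length := by
  intro h
  induction h with
  | nil => intro cs cr ct tr tt rds; simp [countYes]
  | cons x t ih =>
    intro cs cr ct tr tt rds
    obtain ⟨s, c, r⟩ := x
    simp only [List.foldl_cons, stepA, countYes_cons, List.length_cons]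
    split_ifs with h1 h2 <;> simp_all <;> omega

theorem altRounds_nil : altRounds [] = [] := by simp [altRounds]

theorem altRounds_cons (x : String × String × String) (t : List (String × String × String)) :
    altRounds (x :: t) =
      (if x.1 = "" then [] else
        [fmtRound x.1 (countYes (x :: t.takeWhile (fun y => y.1 == x.1)))
          (x :: t.takeWhile (fun y => y.1 == x.1)).length]) ++
      altRounds (t.dropWhile (fun y => y.1 == x.1)) := by
  rw [altRounds]
  split_ifs <;> simp

theorem rounds_lemma :
    ∀ (h : List (String × String × String)) (cs : String) (cr ct tr tt : Nat) (rds : List String),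
    finishRounds (h.foldl stepA (cs, cr, ct, tr, tt, rds)) =
      rds ++ (if cs = "" then [] else
        [fmtRound cs (cr + countYes (h.takeWhile (fun y => y.1 == cs)))
          (ct + (h.takeWhile (fun y => y.1 == cs)).length)]) ++
        altRounds (h.dropWhile (fun y => y.1 == cs)) := by
  intro h
  induction h with
  | nil =>
    intro cs cr ct tr tt rds
    by_cases hcs : cs = "" <;> simp [finishRounds, hcs, countYes, altRounds_nil]
  | cons x t ih =>
    intro cs cr ct tr tt rds
    obtain ⟨s, c, r⟩ := x
    by_cases hs : s = cs
    · -- same search value: no flush, the pending counters advance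
      subst hs
      rw [List.foldl_cons,
        List.takeWhile_cons_of_pos (by simp), List.dropWhile_cons_of_pos (by simp)]
      show finishRounds (List.foldl stepA (stepA (s, cr, ct, tr, tt, rds) (s, c, r)) t) = _
      simp only [stepA, if_neg (by simp : ¬ s ≠ s)]
      by_cases hr : r = "Yes" <;>
        [simp only [hr, reduceIte]; simp only [if_neg hr]] <;>
        rw [ih] <;>
        by_cases hse : s = "" <;>
        simp [hse, countYes_cons, hr] <;>
        simp [Nat.add_assoc, Nat.add_comm]
    · -- search value changes: the pending round is flushed, a new run starts
      rw [List.foldl_cons,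
        List.takeWhile_cons_of_neg (by simp [hs]), List.dropWhile_cons_of_neg (by simp [hs]),
        altRounds_cons]
      show finishRounds (List.foldl stepA (stepA (cs, cr, ct, tr, tt, rds) (s, c, r)) t) = _
      simp only [stepA, if_pos (show s ≠ cs from hs)]
      by_cases hr : r = "Yes" <;>
        [simp only [hr, reduceIte]; simp only [if_neg hr]] <;>
        rw [ih] <;>
        by_cases hse : s = "" <;>
        by_cases hcse : cs = "" <;>
        simp [hse, hcse, countYes, hr, List.append_assoc] <;>
        simp [Nat.add_comm, Nat.add_left_comm]

theorem altRounds_dropEmpty (h : List (String × String × String)) :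
    altRounds (h.dropWhile (fun y => y.1 == "")) = altRounds h := by
  cases h with
  | nil => simp
  | cons x t =>
    by_cases hx : x.1 = ""
    · rw [List.dropWhile_cons_of_pos (by simp [hx])]
      conv_rhs => rw [altRounds]
      simp [hx]
    · rw [List.dropWhile_cons_of_neg (by simp [hx])]

-- ===== VERDICT (by name: the statement is the Claim_ definition above) =====
theorem get_test_progress_spec : Claim_equal_get_test_progress := by
  intro th _
  unfold Spec_get_test_progress get_test_progress get_test_progress_alt
  have hr := rounds_lemma th "" 0 0 0 0 []
  have ht := totals_lemma th "" 0 0 0 0 []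
  rcases hfold : th.foldl stepA ("", 0, 0, 0, 0, []) with ⟨cs, cr, ct, tr, tt, rds⟩
  rw [hfold] at hr ht
  simp only [Nat.zero_add] at ht
  simp only [finishRounds] at hr
  rw [altRounds_dropEmpty] at hr
  simp only [reduceIte, List.nil_append] at hr
  simp only [hr, ht.1, ht.2]
  by_cases he : altRounds th = [] <;>
    simp [he, List.length_pos_iff]
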